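-- pv_equiv track=rewrite | github.com/NestorVil/py110 | PY110-119_Small_Problems/Easy_1/letter_counter_2.py | word_sizes
-- ===== SOURCE A (Python) =====
-- def remove_non_letters(string):
--     result = ""
--     for char in string:
--         if char.isalpha():
--             result += char
--
--     return result
--
-- def word_sizes(words):
--     words_list = words.split()
--     counts = {}
--
--     for word in words_list:
--         clean_word = remove_non_letters(word)
--
--         clean_word_size = len(clean_word)
--         if clean_word_size == 0:
--             continue
--
--         if clean_word_size not in counts:
--             counts[clean_word_size] = 0
--
--         counts[clean_word_size] += 1
--
--     return counts
-- ===== SOURCE B (Python) =====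
-- def word_sizes(words):
--     counts = {}
--     in_token = False
--     letter_count = 0
--     for char in words:
--         if char.isspace():
--             if in_token and letter_count > 0:
--                 counts[letter_count] = counts.get(letter_count, 0) + 1
--             in_token = False
--             letter_count = 0
--         else:
--             in_token = True
--             if char.isalpha():
--                 letter_count += 1
--     if in_token and letter_count > 0:
--         counts[letter_count] = counts.get(letter_count, 0) + 1
--     return counts
-- ===== Notes on version B (the rewrite author's own statement) =====
-- stated objective: alternative
-- what changed: A splits the string into words and runs a letter-filtering helper per word; B makes one character-level scan of the whole string, tokenizing manually with an in_token flag and a running letter count, flushing each token's count into the dict at whitespace boundaries and once at the end.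
import Mathlib
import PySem

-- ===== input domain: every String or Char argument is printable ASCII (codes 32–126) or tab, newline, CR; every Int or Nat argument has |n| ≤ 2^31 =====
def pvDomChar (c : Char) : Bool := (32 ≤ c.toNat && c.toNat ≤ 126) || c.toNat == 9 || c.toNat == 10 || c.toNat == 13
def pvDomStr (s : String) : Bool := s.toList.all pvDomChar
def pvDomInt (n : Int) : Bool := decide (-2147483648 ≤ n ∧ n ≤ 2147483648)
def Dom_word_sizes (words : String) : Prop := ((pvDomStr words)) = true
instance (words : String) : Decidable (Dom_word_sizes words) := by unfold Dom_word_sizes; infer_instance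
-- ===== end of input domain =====

-- B replaces A's split-then-per-word two-level pass by one character-level scan that tokenizes
-- manually (in_token flag + running letter count, flushed at whitespace and at the end); objective: alternative.
-- ===== PORT A =====
def remove_non_letters (string : List Char) : List Char :=
  string.foldl (fun result char =>
    if PySem.Chars.isalpha char then result ++ [char] else result) []

def word_sizes (words : String) : List (Int × Int) :=
  let words_list := PySem.Str.split₀ words
  let counts : PySem.Dict Int Int := words_list.foldl (fun counts word =>
    let clean_word := remove_non_letters word.toList
    let clean_word_size : Int := clean_word.length
    if clean_word_size = 0 then counts
    else
      let counts := if counts.contains clean_word_size then counts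
                    else counts.insert clean_word_size 0
      counts.insert clean_word_size (counts.getD clean_word_size 0 + 1)) PySem.Dict.empty
  counts.items

-- ===== PORT B =====
-- B-side helpers: the loop body of the character scan and the token flush, as in Source B
def wsFlush (st : PySem.Dict Int Int × Bool × Int) : PySem.Dict Int Int :=
  if st.2.1 && decide (0 < st.2.2) then st.1.insert st.2.2 (st.1.getD st.2.2 0 + 1) else st.1

def wsStep (st : PySem.Dict Int Int × Bool × Int) (char : Char) :
    PySem.Dict Int Int × Bool × Int :=
  if PySem.Chars.isspace char then (wsFlush st, false, 0)
  else (st.1, true, if PySem.Chars.isalpha char then st.2.2 + 1 else st.2.2)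

def word_sizes_alt (words : String) : List (Int × Int) :=
  (wsFlush (words.toList.foldl wsStep (PySem.Dict.empty, false, 0))).items

-- ===== PRECONDITION & SPEC =====
def Spec_word_sizes (words : String) (out : List (Int × Int)) : Prop := out = word_sizes_alt words
instance (words : String) (out : List (Int × Int)) : Decidable (Spec_word_sizes words out) := by unfold Spec_word_sizes; infer_instance

-- ===== CLAIM (what is proved, stated in full; the proofs are below) =====
def Claim_equal_word_sizes : Prop := ∀ (words : String), Dom_word_sizes words → Spec_word_sizes words (word_sizes words)

-- ===== LEMMAS AND PROOFS =====

-- positive letter-count sizes of a token list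
def pvSizes (toks : List (List Char)) : List Int :=
  (toks.map (fun t => ((t.filter (fun c => PySem.Chars.isalpha c)).length : Int))).filter
    (fun n => decide (0 < n))

def pvIns (d : PySem.Dict Int Int) (n : Int) : PySem.Dict Int Int :=
  d.insert n (d.getD n 0 + 1)

lemma remove_non_letters_eq (cs : List Char) :
    remove_non_letters cs = cs.filter (fun c => PySem.Chars.isalpha c) := by
  suffices h : ∀ acc, cs.foldl (fun result char =>
      if PySem.Chars.isalpha char then result ++ [char] else result) acc
      = acc ++ cs.filter (fun c => PySem.Chars.isalpha c) by
    simpa [remove_non_letters] using h []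
  induction cs with
  | nil => simp
  | cons c cs ih =>
    intro acc
    by_cases hc : PySem.Chars.isalpha c = true <;> simp [hc, ih]

lemma abody_eq (d : PySem.Dict Int Int) (k : Int) (hk : 0 ≤ k) :
    (if k = 0 then d
     else (if d.contains k then d else d.insert k 0).insert k
        ((if d.contains k then d else d.insert k 0).getD k 0 + 1))
    = if 0 < k then pvIns d k else d := by
  by_cases h0 : k = 0
  · simp [h0]
  · have hlt : 0 < k := lt_of_le_of_ne hk (Ne.symm h0)
    rw [if_neg h0, if_pos hlt]
    by_cases hc : d.contains k = true
    · rw [if_pos hc]; rfl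
    · rw [if_neg hc]
      simp [pvIns, PySem.Dict.getD_insert_self, PySem.Dict.insert_insert_self,
        PySem.Dict.getD_of_not_contains, hc]

-- A's word loop = folding pvIns over the positive sizes of the word list
lemma foldl_filtered (ws : List String) (d : PySem.Dict Int Int) :
    ws.foldl (fun counts word =>
      if ((remove_non_letters word.toList).length : Int) = 0 then counts
      else (if counts.contains ((remove_non_letters word.toList).length : Int) then counts
            else counts.insert ((remove_non_letters word.toList).length : Int) 0).insert
        ((remove_non_letters word.toList).length : Int)
        ((if counts.contains ((remove_non_letters word.toList).length : Int) then counts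
          else counts.insert ((remove_non_letters word.toList).length : Int) 0).getD
            ((remove_non_letters word.toList).length : Int) 0 + 1)) d
    = (pvSizes (ws.map String.toList)).foldl pvIns d := by
  induction ws generalizing d with
  | nil => rfl
  | cons w ws ih =>
    have hk : (0 : Int) ≤ ((w.toList.filter (fun c => PySem.Chars.isalpha c)).length : Int) :=
      Int.natCast_nonneg _
    simp only [remove_non_letters_eq] at ih ⊢
    simp only [List.foldl_cons, List.map_cons, pvSizes, List.filter_cons]
    rw [abody_eq _ _ hk]
    by_cases h : (0 : Int) < ((w.toList.filter (fun c => PySem.Chars.isalpha c)).length : Int)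
    · rw [if_pos h, if_pos (by simpa using h), List.foldl_cons]
      exact ih _
    · rw [if_neg h, if_neg (by simpa using h)]
      exact ih _

lemma split₀_go_acc (cs : List Char) (cur : List Char) (acc : List (List Char)) :
    PySem.Chars.split₀.go cs cur acc = acc.reverse ++ PySem.Chars.split₀.go cs cur [] := by
  induction cs generalizing cur acc with
  | nil =>
    by_cases h : cur.isEmpty = true <;> simp [PySem.Chars.split₀.go, h]
  | cons c cs ih =>
    by_cases hs : PySem.Chars.isspace c = true
    · by_cases h : cur.isEmpty = true
      · simp only [PySem.Chars.split₀.go, hs, h, if_true]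
        exact ih _ _
      · simp only [PySem.Chars.split₀.go, hs, h, if_true, if_false]
        rw [ih _ (cur.reverse :: acc), ih _ [cur.reverse]]
        simp
    · simp only [PySem.Chars.split₀.go, hs, Bool.false_eq_true, if_false]
      exact ih _ _

lemma pvSizes_append (a b : List (List Char)) :
    pvSizes (a ++ b) = pvSizes a ++ pvSizes b := by
  simp [pvSizes]

lemma flush_reverse (cur : List Char) (d : PySem.Dict Int Int) (h : cur.isEmpty = false) :
    wsFlush (d, !cur.isEmpty,
        ((cur.filter (fun c => PySem.Chars.isalpha c)).length : Int))
      = (pvSizes [cur.reverse]).foldl pvIns d := by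
  set L : Int := ((cur.filter (fun c => PySem.Chars.isalpha c)).length : Int) with hLdef
  have hL : ((cur.reverse.filter (fun c => PySem.Chars.isalpha c)).length : Int) = L := by
    rw [hLdef, List.filter_reverse, List.length_reverse]
  unfold wsFlush pvSizes
  simp only [List.map_cons, List.map_nil, List.filter_cons, List.filter_nil, hL, h,
    Bool.not_false, Bool.true_and]
  by_cases hp : 0 < L
  · rw [if_pos (decide_eq_true hp), if_pos (decide_eq_true hp)]
    rfl
  · rw [if_neg (by simpa using hp), if_neg (by simpa using hp)]
    rfl

-- main invariant: the character scan, then a final flush, equals folding pvIns over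
-- the positive sizes of the tokens that split₀.go produces from the rest of the string
lemma scan_invariant (cs : List Char) (cur : List Char) (d : PySem.Dict Int Int) :
    wsFlush (cs.foldl wsStep
        (d, !cur.isEmpty, ((cur.filter (fun c => PySem.Chars.isalpha c)).length : Int)))
      = (pvSizes (PySem.Chars.split₀.go cs cur [])).foldl pvIns d := by
  induction cs generalizing cur d with
  | nil =>
    by_cases h : cur.isEmpty = true
    · simp [PySem.Chars.split₀.go, h, wsFlush, pvSizes]
    · have hgo : PySem.Chars.split₀.go [] cur [] = [cur.reverse] := by
        rw [PySem.Chars.split₀.go]; simp [h]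
      rw [List.foldl_nil, hgo]
      exact flush_reverse cur d (by simpa using h)
  | cons c cs ih =>
    by_cases hs : PySem.Chars.isspace c = true
    · have hstep : wsStep (d, !cur.isEmpty,
          ((cur.filter (fun c => PySem.Chars.isalpha c)).length : Int)) c
          = (wsFlush (d, !cur.isEmpty,
              ((cur.filter (fun c => PySem.Chars.isalpha c)).length : Int)), false, 0) := by
        simp [wsStep, hs]
      rw [List.foldl_cons, hstep]
      by_cases h : cur.isEmpty = true
      · have hfl : wsFlush (d, !cur.isEmpty,
            ((cur.filter (fun c => PySem.Chars.isalpha c)).length : Int)) = d := by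
          simp [wsFlush, h]
        have hgo : PySem.Chars.split₀.go (c :: cs) cur [] = PySem.Chars.split₀.go cs [] [] := by
          rw [PySem.Chars.split₀.go, if_pos hs, if_pos h]
        rw [hfl, hgo]
        simpa using ih [] d
      · have hfl := flush_reverse cur d (by simpa using h)
        have hgo : PySem.Chars.split₀.go (c :: cs) cur [] =
            [cur.reverse] ++ PySem.Chars.split₀.go cs [] [] := by
          rw [PySem.Chars.split₀.go, if_pos hs, if_neg h, split₀_go_acc]
          simp
        rw [hfl, hgo, pvSizes_append, List.foldl_append]
        simpa using ih [] ((pvSizes [cur.reverse]).foldl pvIns d)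
    · have hstep : wsStep (d, !cur.isEmpty,
          ((cur.filter (fun c => PySem.Chars.isalpha c)).length : Int)) c
          = (d, !(c :: cur).isEmpty,
             (((c :: cur).filter (fun c => PySem.Chars.isalpha c)).length : Int)) := by
        by_cases ha : PySem.Chars.isalpha c = true <;>
          simp [wsStep, hs, ha, List.filter_cons]
      rw [List.foldl_cons, hstep, show PySem.Chars.split₀.go (c :: cs) cur [] =
        PySem.Chars.split₀.go cs (c :: cur) [] from by
          rw [PySem.Chars.split₀.go, if_neg hs]]
      exact ih (c :: cur) d

lemma sizes_toList_ofList (toks : List (List Char)) :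
    pvSizes ((toks.map String.ofList).map String.toList) = pvSizes toks := by
  simp [pvSizes, List.map_map, Function.comp_def]

-- ===== VERDICT (by name: the statement is the Claim_ definition above) =====
theorem word_sizes_spec : Claim_equal_word_sizes := by
  intro words _
  unfold Spec_word_sizes word_sizes word_sizes_alt
  simp only []
  rw [foldl_filtered, PySem.Str.split₀, sizes_toList_ofList]
  have hB := scan_invariant words.toList [] PySem.Dict.empty
  simp only [List.isEmpty_nil, List.filter_nil, List.length_nil, Nat.cast_zero,
    Bool.not_true] at hB
  rw [PySem.Chars.split₀, hB]
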